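-- pv_equiv track=rewrite | github.com/TieuLongPhan/SynRBL | synrbl/SynUtils/chem_utils.py | list_difference
-- ===== SOURCE A (Python) =====
-- from collections import Counter
-- from typing import List, Dict, Tuple, Optional, Union
--
-- def list_difference(
--     list1: List[str], list2: List[str]
-- ) -> Tuple[Dict[str, int], Dict[str, int]]:
--     """
--     Compares two lists and returns dictionaries that count unique occurrences
--     Parameters:
--     list1 (List[str]): First list of items for comparison.
--     list2 (List[str]): Second list of items for comparison.
--
--     Returns:
--     Tuple[Dict[str, int], Dict[str, int]]: A tuple of two dictionaries:
--         - First dictionary: Items unique to the first list with their counts.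
--         - Second dictionary: Items unique to the second list with their counts.
--     """
--     count1 = Counter(list1)
--     count2 = Counter(list2)
--     unique_to_list1 = {}
--     unique_to_list2 = {}
--
--     for key, count in count1.items():
--         if key not in count2:
--             unique_to_list1[key] = count
--         elif count > count2[key]:
--             unique_to_list1[key] = count - count2[key]
--
--     for key, count in count2.items():
--         if key not in count1:
--             unique_to_list2[key] = count
--         elif count > count1[key]:
--             unique_to_list2[key] = count - count1[key]
--
--     return unique_to_list1, unique_to_list2
-- ===== SOURCE B (Python) =====
-- def list_difference(list1, list2):
--     # one signed multiset-difference map: +1 per occurrence in list1, -1 per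
--     # occurrence in list2; then split its sign over each list's first-occurrence order
--     diff = {}
--     for x in list1:
--         diff[x] = diff.get(x, 0) + 1
--     for x in list2:
--         diff[x] = diff.get(x, 0) - 1
--     unique_to_list1 = {x: diff[x] for x in dict.fromkeys(list1) if diff[x] > 0}
--     unique_to_list2 = {x: -diff[x] for x in dict.fromkeys(list2) if diff[x] < 0}
--     return unique_to_list1, unique_to_list2
-- ===== Notes on version B (the rewrite author's own statement) =====
-- stated objective: alternative
-- what changed: Instead of two Counters compared key-by-key with not-in/elif branching, B builds ONE signed difference map (+1 for list1 occurrences, -1 for list2) and then splits it by sign: positive entries in list1's first-occurrence order, negated negative entries in list2's order.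
import Mathlib
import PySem

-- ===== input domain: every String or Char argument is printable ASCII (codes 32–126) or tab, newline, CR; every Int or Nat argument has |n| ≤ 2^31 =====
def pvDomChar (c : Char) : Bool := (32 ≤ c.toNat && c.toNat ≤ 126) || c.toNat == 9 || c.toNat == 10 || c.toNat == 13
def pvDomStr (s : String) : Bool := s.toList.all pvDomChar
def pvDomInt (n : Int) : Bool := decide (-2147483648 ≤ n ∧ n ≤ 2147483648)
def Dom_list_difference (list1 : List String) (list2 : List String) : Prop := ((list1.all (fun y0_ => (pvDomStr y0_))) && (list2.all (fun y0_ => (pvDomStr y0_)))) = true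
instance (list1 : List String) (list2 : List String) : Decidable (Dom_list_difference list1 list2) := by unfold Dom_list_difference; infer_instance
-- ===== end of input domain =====

-- B replaces A's two Counters compared key-by-key by ONE signed difference map
-- (+1 / -1 per occurrence) split by sign over each list's first-occurrence order.

-- ===== PORT A =====
def list_difference (list1 : List String) (list2 : List String) : (List (String × Int)) × (List (String × Int)) :=
  let count1 := PySem.Dict.counter list1
  let count2 := PySem.Dict.counter list2
  let unique_to_list1 := count1.items.foldl (fun d kv =>
      if count2.contains kv.1 = false then d.insert kv.1 kv.2
      else if kv.2 > count2.getD kv.1 0 then d.insert kv.1 (kv.2 - count2.getD kv.1 0)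
      else d) PySem.Dict.empty
  let unique_to_list2 := count2.items.foldl (fun d kv =>
      if count1.contains kv.1 = false then d.insert kv.1 kv.2
      else if kv.2 > count1.getD kv.1 0 then d.insert kv.1 (kv.2 - count1.getD kv.1 0)
      else d) PySem.Dict.empty
  (unique_to_list1.items, unique_to_list2.items)

-- ===== PORT B =====
-- diff[x] = diff.get(x, 0) + 1 loop, then the -1 loop, then the two dict
-- comprehensions over dict.fromkeys (= PySem.List.dedup; keys distinct,
-- so the resulting dict's items ARE the filtered key list)
def list_difference_alt (list1 : List String) (list2 : List String) : (List (String × Int)) × (List (String × Int)) :=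
  let diff := list2.foldl (fun d x => d.insert x (d.getD x 0 - 1))
                (list1.foldl (fun d x => d.insert x (d.getD x 0 + 1)) PySem.Dict.empty)
  let unique_to_list1 := (PySem.List.dedup list1).filterMap (fun x =>
      if diff.getD x 0 > 0 then some (x, diff.getD x 0) else none)
  let unique_to_list2 := (PySem.List.dedup list2).filterMap (fun x =>
      if diff.getD x 0 < 0 then some (x, -(diff.getD x 0)) else none)
  (unique_to_list1, unique_to_list2)

-- ===== PRECONDITION & SPEC =====
def Spec_list_difference (list1 : List String) (list2 : List String) (out : (List (String × Int)) × (List (String × Int))) : Prop := out = list_difference_alt list1 list2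
instance (list1 : List String) (list2 : List String) (out : (List (String × Int)) × (List (String × Int))) : Decidable (Spec_list_difference list1 list2 out) := by unfold Spec_list_difference; infer_instance

-- ===== CLAIM (what is proved, stated in full; the proofs are below) =====
def Claim_equal_list_difference : Prop := ∀ (list1 : List String) (list2 : List String), Dom_list_difference list1 list2 → Spec_list_difference list1 list2 (list_difference list1 list2)

-- ===== LEMMAS AND PROOFS =====

-- B's diff map holds the signed count difference at every key
theorem pv_getD_sub_loop (l : List String) :
    ∀ (d : PySem.Dict String Int) (v : String),
      (l.foldl (fun d x => d.insert x (d.getD x 0 - 1)) d).getD v 0 = d.getD v 0 - l.count v := by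
  induction l with
  | nil => intro d v; simp
  | cons x rest ih =>
      intro d v
      rw [List.foldl_cons, ih, PySem.Dict.getD_insert, List.count_cons]
      by_cases h : v = x
      · simp [h]; omega
      · simp [h, Ne.symm h]

theorem pv_diff_getD (l1 l2 : List String) (v : String) :
    ((l2.foldl (fun d x => d.insert x (d.getD x 0 - 1))
        (l1.foldl (fun d x => d.insert x (d.getD x 0 + 1)) PySem.Dict.empty)).getD v 0)
      = (l1.count v : Int) - l2.count v := by
  rw [pv_getD_sub_loop, PySem.Dict.getD_foldl_insert_add_one]
  simp

-- generic: a loop over pairs with distinct, fresh keys that optionally inserts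
-- (as directed by F) appends exactly the filterMap of F to the dict's items
theorem pv_foldl_optInsert_items (F : String → Int → Option Int)
    (g : PySem.Dict String Int → String × Int → PySem.Dict String Int)
    (hg : ∀ d kv, g d kv = match F kv.1 kv.2 with | some v => d.insert kv.1 v | none => d) :
    ∀ (ps : List (String × Int)) (d : PySem.Dict String Int),
      (ps.map Prod.fst).Nodup → (∀ p ∈ ps, d.contains p.1 = false) →
      (ps.foldl g d).items
        = d.items ++ ps.filterMap (fun kv => (F kv.1 kv.2).map (fun v => (kv.1, v))) := by
  intro ps
  induction ps with
  | nil => intro d _ _; simp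
  | cons p rest ih =>
      intro d hnd hfresh
      simp only [List.map_cons, List.nodup_cons] at hnd
      have hrest : ∀ q ∈ rest, q.1 ≠ p.1 := by
        intro q hq hqe
        exact hnd.1 (hqe ▸ List.mem_map_of_mem hq)
      rw [List.foldl_cons, hg, List.filterMap_cons]
      cases hF : F p.1 p.2 with
      | none =>
          simp only
          exact ih d hnd.2 (fun q hq => hfresh q (List.mem_cons_of_mem _ hq))
      | some v =>
          simp only [Option.map_some]
          rw [ih (d.insert p.1 v) hnd.2 ?_]
          · rw [PySem.Dict.items_insert, hfresh p List.mem_cons_self]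
            simp
          · intro q hq
            rw [PySem.Dict.contains_insert]
            simp only [Bool.or_eq_false_iff, beq_eq_false_iff_ne, ne_eq]
            exact ⟨hrest q hq, hfresh q (List.mem_cons_of_mem _ hq)⟩

-- one side of A's loop, as a filterMap of the signed count difference over dedup l1
theorem pv_side_eq (l1 l2 : List String) :
    ((PySem.Dict.counter l1).items.foldl (fun d kv =>
        if (PySem.Dict.counter l2).contains kv.1 = false then d.insert kv.1 kv.2
        else if kv.2 > (PySem.Dict.counter l2).getD kv.1 0 then d.insert kv.1 (kv.2 - (PySem.Dict.counter l2).getD kv.1 0)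
        else d) PySem.Dict.empty).items
      = (PySem.List.dedup l1).filterMap (fun x =>
          if ((l1.count x : Int) - l2.count x) > 0 then some (x, (l1.count x : Int) - l2.count x) else none) := by
  rw [pv_foldl_optInsert_items
        (fun k c =>
          if (PySem.Dict.counter l2).contains k = false then some c
          else if c > (PySem.Dict.counter l2).getD k 0 then some (c - (PySem.Dict.counter l2).getD k 0)
          else none)
        _ (fun d kv => by dsimp only; split_ifs <;> rfl)
        (PySem.Dict.counter l1).items PySem.Dict.empty
        (PySem.Dict.nodup_keys_counter l1)
        (fun p _ => PySem.Dict.contains_empty _)]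
  have hemp : (PySem.Dict.empty : PySem.Dict String Int).items = [] := rfl
  rw [hemp, List.nil_append, PySem.Dict.items_counter, List.filterMap_map,
      PySem.List.dedup_eq_ofList]
  apply List.filterMap_congr
  intro k hk
  have hkl1 : k ∈ l1 := (PySem.Set.mem_ofList _ _).mp hk
  have hcnt1 : 1 ≤ l1.count k := List.one_le_count_iff.mpr hkl1
  have hgd : (PySem.Dict.counter l2).getD k 0 = (l2.count k : Int) :=
    PySem.Dict.getD_counter l2 k
  simp only [Function.comp_apply, hgd]
  by_cases hmem : k ∈ l2
  · have hc2 : (PySem.Dict.counter l2).contains k = true := by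
      rw [PySem.Dict.contains_counter]; simpa using hmem
    simp only [hc2, Bool.true_eq_false, if_false]
    split_ifs with h1 h2 h2 <;> simp <;> omega
  · have hc2 : (PySem.Dict.counter l2).contains k = false := by
      rw [PySem.Dict.contains_counter]; simpa using hmem
    have hz : l2.count k = 0 := List.count_eq_zero.mpr hmem
    simp only [hc2, hz, if_true]
    split_ifs <;> simp
    omega

-- ===== VERDICT (by name: the statement is the Claim_ definition above) =====
theorem list_difference_spec : Claim_equal_list_difference := by
  intro list1 list2 _
  unfold Spec_list_difference list_difference list_difference_alt
  dsimp only
  refine Prod.ext ?_ ?_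
  · rw [pv_side_eq list1 list2]
    apply List.filterMap_congr
    intro x _
    rw [pv_diff_getD]
  · rw [pv_side_eq list2 list1]
    apply List.filterMap_congr
    intro x _
    rw [pv_diff_getD]
    have : (list2.count x : Int) - list1.count x > 0 ↔ (list1.count x : Int) - list2.count x < 0 := by omega
    split_ifs with h1 h2 h2
    · rw [show (list2.count x : Int) - list1.count x = -((list1.count x : Int) - list2.count x) by omega]
    · exact absurd (this.mp h1) h2
    · exact absurd (this.mpr h2) h1
    · rfl
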